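-- pv_equiv track=rewrite | github.com/mariana518/PROBASICA_EJ25 | SEMANA 7/act9.ubicador de vocales.py | ubicadorDeVocales
-- ===== SOURCE A (Python) =====
-- def ubicadorDeVocales(cadena):
--     vocales = "aáeéiíoóuú"
--     ubicaciones = {}
--
--     for indice, caracter in enumerate(cadena):
--         if caracter.lower() in vocales:
--             if caracter.lower() not in ubicaciones:
--                 ubicaciones[caracter.lower()] = []
--             ubicaciones[caracter.lower()].append(indice)
--
--     return ubicaciones
-- ===== SOURCE B (Python) =====
-- def ubicadorDeVocales(cadena):
--     vocales = "aáeéiíoóuú"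
--     pares = [(c.lower(), i) for i, c in enumerate(cadena) if c.lower() in vocales]
--     orden = []
--     for v, _ in pares:
--         if v not in orden:
--             orden.append(v)
--     return {v: [i for w, i in pares if w == v] for v in orden}
-- ===== Notes on version B (the rewrite author's own statement) =====
-- stated objective: alternative
-- what changed: A builds the dict incrementally while scanning (setdefault-style init plus append per character); B is a two-phase filter-then-group: it first extracts the list of (lowered vowel, index) pairs in one comprehension, derives the first-occurrence key order, and builds the result with per-vowel gathering comprehensions.
import Mathlib
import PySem

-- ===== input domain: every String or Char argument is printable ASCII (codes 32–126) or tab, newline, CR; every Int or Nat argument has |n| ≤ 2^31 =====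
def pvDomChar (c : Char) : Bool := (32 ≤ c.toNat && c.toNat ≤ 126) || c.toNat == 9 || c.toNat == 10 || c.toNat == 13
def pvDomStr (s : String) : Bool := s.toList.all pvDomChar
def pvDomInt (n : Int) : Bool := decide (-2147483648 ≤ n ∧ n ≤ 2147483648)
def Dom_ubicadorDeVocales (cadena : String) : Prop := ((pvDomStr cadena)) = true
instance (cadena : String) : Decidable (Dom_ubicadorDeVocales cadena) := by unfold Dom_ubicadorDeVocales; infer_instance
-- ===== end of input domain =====

-- B replaces A's incremental dict-building scan by a filter-then-group decomposition (alternative, same cost).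

-- ===== PORT A =====
def ubicadorDeVocales (cadena : String) : List (String × List Int) :=
  let vocales := "aáeéiíoóuú"
  ((PySem.List.enumerate cadena.toList).foldl
    (fun (d : PySem.Dict String (List Int)) (p : Int × Char) =>
      let lc := String.singleton (PySem.Chars.lowerChar p.2)
      if PySem.Str.isIn lc vocales then
        -- 'if lc not in ubicaciones: ubicaciones[lc] = []' then append = modify with default []
        d.modify lc [] (fun xs => xs ++ [p.1])
      else d)
    PySem.Dict.empty).items

-- ===== PORT B =====
def ubicadorDeVocales_alt (cadena : String) : List (String × List Int) :=
  let vocales := "aáeéiíoóuú"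
  let pares : List (String × Int) :=
    ((PySem.List.enumerate cadena.toList).filter
        (fun p => PySem.Str.isIn (String.singleton (PySem.Chars.lowerChar p.2)) vocales)).map
      (fun p => (String.singleton (PySem.Chars.lowerChar p.2), p.1))
  let orden : List String :=
    pares.foldl (fun acc p => if acc.contains p.1 then acc else acc ++ [p.1]) []
  (orden.foldl
    (fun (d : PySem.Dict String (List Int)) v =>
      d.insert v ((pares.filter (fun w => w.1 == v)).map (·.2)))
    PySem.Dict.empty).items

-- ===== PRECONDITION & SPEC =====
def Spec_ubicadorDeVocales (cadena : String) (out : List (String × List Int)) : Prop := out = ubicadorDeVocales_alt cadena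
instance (cadena : String) (out : List (String × List Int)) : Decidable (Spec_ubicadorDeVocales cadena out) := by unfold Spec_ubicadorDeVocales; infer_instance

-- ===== CLAIM (what is proved, stated in full; the proofs are below) =====
def Claim_equal_ubicadorDeVocales : Prop := ∀ (cadena : String), Dom_ubicadorDeVocales cadena → Spec_ubicadorDeVocales cadena (ubicadorDeVocales cadena)

-- ===== LEMMAS AND PROOFS =====

-- A fold that skips elements failing `cond` equals the fold over the filtered list.
theorem foldl_filter_skip {α β : Type} (cond : α → Bool) (g : β → α → β) :
    ∀ (l : List α) (b : β),
      l.foldl (fun d p => if cond p then g d p else d) b = (l.filter cond).foldl g b := by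
  intro l
  induction l with
  | nil => intro b; rfl
  | cons x t ih =>
    intro b
    by_cases h : cond x = true
    · simp [List.foldl, List.filter, h, ih]
    · simp [List.foldl, List.filter, h, ih]

theorem orden_eq_set (pares : List (String × Int)) :
    pares.foldl (fun acc p => if acc.contains p.1 then acc else acc ++ [p.1]) []
      = PySem.Set.ofList (pares.map (·.1)) := by
  show _ = List.foldl PySem.Set.add PySem.Set.empty (pares.map (·.1))
  rw [List.foldl_map]
  rfl

theorem ubicadorDeVocales_spec' (cadena : String) :
    ubicadorDeVocales cadena = ubicadorDeVocales_alt cadena := by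
  unfold ubicadorDeVocales ubicadorDeVocales_alt
  simp only []
  set vocales := "aáeéiíoóuú" with hv
  set cond : Int × Char → Bool :=
    fun p => PySem.Str.isIn (String.singleton (PySem.Chars.lowerChar p.2)) vocales with hcond
  set l := PySem.List.enumerate cadena.toList with hl
  set pares : List (String × Int) :=
    (l.filter cond).map (fun p => (String.singleton (PySem.Chars.lowerChar p.2), p.1)) with hpares
  -- A's loop: skip-fold = fold over the filtered list = modify-fold over `pares`
  have hA :
      l.foldl
        (fun (d : PySem.Dict String (List Int)) (p : Int × Char) =>
          if cond p then
            d.modify (String.singleton (PySem.Chars.lowerChar p.2)) [] (fun xs => xs ++ [p.1])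
          else d)
        PySem.Dict.empty
      = pares.foldl (fun d q => d.modify q.1 [] (fun xs => xs ++ [q.2])) PySem.Dict.empty := by
    rw [foldl_filter_skip cond
      (fun (d : PySem.Dict String (List Int)) (p : Int × Char) =>
        d.modify (String.singleton (PySem.Chars.lowerChar p.2)) [] (fun xs => xs ++ [p.1]))]
    rw [hpares, List.foldl_map]
  rw [hA]
  -- keys of A's dict are the dedup of pares' keys, in first-occurrence order
  have hkeys :
      (pares.foldl (fun d q => d.modify q.1 [] (fun xs => xs ++ [q.2]))
        (PySem.Dict.empty : PySem.Dict String (List Int))).keys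
        = PySem.Set.ofList (pares.map (·.1)) := by
    rw [PySem.Dict.keys_foldl_modify_key pares (·.1) [] (fun _ q xs => xs ++ [q.2])]
    rfl
  have hnodup :
      (pares.foldl (fun d q => d.modify q.1 [] (fun xs => xs ++ [q.2]))
        (PySem.Dict.empty : PySem.Dict String (List Int))).keys.Nodup := by
    exact PySem.Dict.nodup_keys_foldl_modify_key pares (·.1) [] (fun _ q xs => xs ++ [q.2]) _
      (by simp [PySem.Dict.empty, PySem.Dict.keys])
  -- A's items, as a map over its keys
  rw [PySem.Dict.items_eq_map_keys _ hnodup []]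
  rw [hkeys]
  -- B's orden is that same dedup list
  rw [orden_eq_set pares]
  -- B's dict: inserts over fresh distinct keys append in order
  rw [PySem.Dict.items_foldl_insert_fresh (PySem.Set.ofList (pares.map (·.1)))
        (fun v => v) (fun v => (pares.filter (fun w => w.1 == v)).map (·.2)) PySem.Dict.empty
        (fun a _ => rfl) (by simp)]
  -- pointwise: A's value at key v is exactly B's gathered list
  apply List.map_congr_left
  intro v _
  rw [PySem.Dict.getD_foldl_modify_append pares PySem.Dict.empty v]
  rfl

-- ===== VERDICT (by name: the statement is the Claim_ definition above) =====
theorem ubicadorDeVocales_spec : Claim_equal_ubicadorDeVocales := by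
  intro cadena _
  unfold Spec_ubicadorDeVocales
  exact ubicadorDeVocales_spec' cadena
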